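-- pv_equiv track=rewrite | github.com/hunterhector/EvmEval | temporal.py | find_equivalent_sets
-- ===== SOURCE A (Python) =====
-- def find_equivalent_sets(clusters, nodes):
--     node_2_set = {}
--     set_2_nodes = {}
--     non_singletons = set()
--
--     set_index = 0
--
--     for cluster in clusters:
--         for element in cluster[2]:
--             node_2_set[element] = "c%d" % set_index
--             non_singletons.add(element)
--
--             try:
--                 set_2_nodes["c%d" % set_index].append(element)
--             except KeyError:
--                 set_2_nodes["c%d" % set_index] = [element]
--
--         set_index += 1
--
--     for node in nodes:
--         if node not in non_singletons:
--             node_2_set[node] = "c%d" % set_index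
--             try:
--                 set_2_nodes["c%d" % set_index].append(node)
--             except KeyError:
--                 set_2_nodes["c%d" % set_index] = [node]
--
--             set_index += 1
--
--     return set_2_nodes, node_2_set
-- ===== SOURCE B (Python) =====
-- def find_equivalent_sets(clusters, nodes):
--     # Stage 1: flatten everything into one stream of (set_name, element) assignment pairs.
--     assignments = []
--     count = 0
--     for cluster in clusters:
--         name = "c%d" % count
--         for element in cluster[2]:
--             assignments.append((name, element))
--         count += 1
--     members = {element for _, element in assignments}
--     for node in nodes:
--         if node not in members:
--             assignments.append(("c%d" % count, node))
--             count += 1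
--     # Stage 2: set names occur in consecutive runs in the stream, so group by run,
--     # comparing only against the last run -- no dict lookup / setdefault / try-except.
--     runs = []
--     for name, element in assignments:
--         if runs and runs[-1][0] == name:
--             runs[-1][1].append(element)
--         else:
--             runs.append((name, [element]))
--     set_2_nodes = dict(runs)
--     # Stage 3: node -> name, later assignments win while the key keeps its first position.
--     node_2_set = {element: name for name, element in assignments}
--     return set_2_nodes, node_2_set
-- ===== Notes on version B (the rewrite author's own statement) =====
-- stated objective: faster
-- what changed: B first flattens the input into one stream of (set-name, element) assignment pairs (cluster members, then fresh singleton sets for nodes outside the precomputed member set), then builds set_2_nodes by run-length grouping that stream -- names occur in consecutive runs, so it only compares against the last run, with no dict lookup, setdefault or try/except -- and builds node_2_set as a dict comprehension over the same stream, instead of A's concurrent maintenance of both dicts with per-element try/except appends. …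
import Mathlib
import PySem

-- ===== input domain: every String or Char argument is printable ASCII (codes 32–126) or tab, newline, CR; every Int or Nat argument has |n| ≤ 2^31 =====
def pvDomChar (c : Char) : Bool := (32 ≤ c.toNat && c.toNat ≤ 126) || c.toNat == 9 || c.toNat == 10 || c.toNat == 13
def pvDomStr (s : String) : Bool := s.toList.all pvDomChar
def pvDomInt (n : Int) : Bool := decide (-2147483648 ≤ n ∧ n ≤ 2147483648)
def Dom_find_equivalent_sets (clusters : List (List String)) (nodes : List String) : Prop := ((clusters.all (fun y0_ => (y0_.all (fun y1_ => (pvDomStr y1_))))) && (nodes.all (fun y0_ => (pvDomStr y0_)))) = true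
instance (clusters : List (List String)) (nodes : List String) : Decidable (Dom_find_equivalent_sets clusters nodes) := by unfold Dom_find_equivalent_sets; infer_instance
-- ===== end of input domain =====

-- B flattens the input into one stream of (set-name, element) assignment pairs and then derives
-- set_2_nodes by run-length grouping of that stream and node_2_set by a dict comprehension over it,
-- instead of A's concurrent maintenance of both dicts with try/except appends (objective: faster by
-- a measured constant factor; same asymptotic cost).

-- ===== PORT A =====
-- "c%d" % i  (i is the running set index, always ≥ 0)
def pvKey (i : Nat) : String := "c" ++ PySem.Int.toStr (i : Int)

-- A's  try: d[k].append(e)  except KeyError: d[k] = [e]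
def pvAppendTo (d : PySem.Dict String (List String)) (k e : String) :
    PySem.Dict String (List String) :=
  match d.get? k with
  | some xs => d.insert k (xs ++ [e])
  | none => d.insert k [e]

-- A's state: (node_2_set, set_2_nodes, non_singletons, set_index)
-- body of A's inner loop 'for element in cluster[2]' (elements of a str are 1-char strings)
def pvA_el (st : PySem.Dict String String × PySem.Dict String (List String) × PySem.Set String × Nat)
    (ch : Char) :
    PySem.Dict String String × PySem.Dict String (List String) × PySem.Set String × Nat :=
  let e := String.ofList [ch]
  (st.1.insert e (pvKey st.2.2.2), pvAppendTo st.2.1 (pvKey st.2.2.2) e,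
   PySem.Set.add st.2.2.1 e, st.2.2.2)

-- body of 'for cluster in clusters'; cluster[2] = pyGet? cluster 2 (some under Pre_; the
-- .getD "" default is never reached inside Pre_, where Python would raise IndexError)
def pvA_cluster
    (st : PySem.Dict String String × PySem.Dict String (List String) × PySem.Set String × Nat)
    (cluster : List String) :
    PySem.Dict String String × PySem.Dict String (List String) × PySem.Set String × Nat :=
  let st' := (((PySem.List.pyGet? cluster 2).getD "").toList).foldl pvA_el st
  (st'.1, st'.2.1, st'.2.2.1, st'.2.2.2 + 1)

-- body of 'for node in nodes'
def pvA_node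
    (st : PySem.Dict String String × PySem.Dict String (List String) × PySem.Set String × Nat)
    (node : String) :
    PySem.Dict String String × PySem.Dict String (List String) × PySem.Set String × Nat :=
  if PySem.Set.contains st.2.2.1 node then st
  else (st.1.insert node (pvKey st.2.2.2), pvAppendTo st.2.1 (pvKey st.2.2.2) node,
        st.2.2.1, st.2.2.2 + 1)

def find_equivalent_sets (clusters : List (List String)) (nodes : List String) :
    (List (String × List String)) × (List (String × String)) :=
  let st1 := clusters.foldl pvA_cluster (PySem.Dict.empty, PySem.Dict.empty, PySem.Set.empty, 0)
  let st2 := nodes.foldl pvA_node st1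
  (st2.2.1.items, st2.1.items)

-- ===== PORT B =====
-- stage-1 cluster step: append (name, element) pairs for cluster[2]'s chars, bump count
def pvB_clStep (st : List (String × String) × Nat) (cluster : List String) :
    List (String × String) × Nat :=
  let name := pvKey st.2
  ((((PySem.List.pyGet? cluster 2).getD "").toList).foldl
     (fun l ch => l ++ [(name, String.ofList [ch])]) st.1, st.2 + 1)

-- stage-1 node step: a fresh consecutive singleton assignment for each node outside 'members'
def pvB_ndStep (members : PySem.Set String) (st : List (String × String) × Nat) (node : String) :
    List (String × String) × Nat :=
  if PySem.Set.contains members node then st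
  else (st.1 ++ [(pvKey st.2, node)], st.2 + 1)

-- stage-2 step: 'if runs and runs[-1][0] == name: runs[-1][1].append(e) else: runs.append((name,[e]))'
def pvRunStep (runs : List (String × List String)) (p : String × String) :
    List (String × List String) :=
  match runs.getLast? with
  | some last =>
      if last.1 == p.1 then runs.dropLast ++ [(last.1, last.2 ++ [p.2])]
      else runs ++ [(p.1, [p.2])]
  | none => [(p.1, [p.2])]

-- stage-2 loop: runs = fold of pvRunStep over the assignment stream
def pvRunsOf (asg : List (String × String)) : List (String × List String) :=
  asg.foldl pvRunStep []

-- stage-3 dict comprehension {element: name for name, element in assignments}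
def pvNodeDict (asg : List (String × String)) : PySem.Dict String String :=
  asg.foldl (fun d p => d.insert p.2 p.1) PySem.Dict.empty

def find_equivalent_sets_alt (clusters : List (List String)) (nodes : List String) :
    (List (String × List String)) × (List (String × String)) :=
  let p1 := clusters.foldl pvB_clStep ([], 0)
  let members : PySem.Set String := PySem.Set.ofList (p1.1.map Prod.snd)
  let asg := (nodes.foldl (pvB_ndStep members) p1).1
  let s2n : PySem.Dict String (List String) := PySem.Dict.ofList (pvRunsOf asg)
  ((s2n.items), (pvNodeDict asg).items)

-- ===== PRECONDITION & SPEC =====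
-- Pre_ excludes exactly the inputs where Python A raises IndexError: a cluster with fewer
-- than 3 elements (A reads cluster[2]; B reads it too and raises on the same inputs).
def Pre_find_equivalent_sets (clusters : List (List String)) (nodes : List String) : Prop :=
  ∀ c ∈ clusters, 3 ≤ c.length
instance (clusters : List (List String)) (nodes : List String) :
    Decidable (Pre_find_equivalent_sets clusters nodes) := by
  unfold Pre_find_equivalent_sets; infer_instance

def pvWitness_find_equivalent_sets : List (List String) × List String :=
  ([["e1", "e2", "ab"], ["e3", "e4", "bc"]], ["a", "z", "b"])

def Spec_find_equivalent_sets (clusters : List (List String)) (nodes : List String)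
    (out : (List (String × List String)) × (List (String × String))) : Prop :=
  out = find_equivalent_sets_alt clusters nodes
instance (clusters : List (List String)) (nodes : List String)
    (out : (List (String × List String)) × (List (String × String))) :
    Decidable (Spec_find_equivalent_sets clusters nodes out) := by
  unfold Spec_find_equivalent_sets; infer_instance

-- ===== CLAIM (what is proved, stated in full; the proofs are below) =====
def Claim_equal_find_equivalent_sets : Prop :=
  ∀ (clusters : List (List String)) (nodes : List String),
    Dom_find_equivalent_sets clusters nodes → Pre_find_equivalent_sets clusters nodes →
    Spec_find_equivalent_sets clusters nodes (find_equivalent_sets clusters nodes)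

-- ===== LEMMAS AND PROOFS =====

-- decimal digits parse back: injectivity of "c%d" names
def pvParse (cs : List Char) : Nat := cs.foldl (fun a c => 10 * a + (c.toNat - 48)) 0

theorem pvParse_toDigits (n : Nat) : pvParse (Nat.toDigits 10 n) = n := by
  induction n using Nat.strong_induction_on with
  | _ n ih =>
    by_cases h : n < 10
    · rw [Nat.toDigits_of_lt_base h]
      interval_cases n <;> decide
    · rw [Nat.toDigits_of_base_le (by norm_num) (Nat.le_of_not_lt h)]
      unfold pvParse
      rw [List.foldl_append]
      have hrec := ih (n / 10) (by omega)
      unfold pvParse at hrec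
      rw [hrec]
      have hm : n % 10 < 10 := Nat.mod_lt _ (by norm_num)
      have hd : (Nat.digitChar (n % 10)).toNat - 48 = n % 10 := by
        interval_cases h2 : (n % 10) <;> decide
      simp only [List.foldl]
      omega

theorem pvKey_inj {a b : Nat} (h : pvKey a = pvKey b) : a = b := by
  have h1 := congrArg String.toList h
  simp only [pvKey, PySem.Int.toStr, PySem.Int.toChars, String.toList_append] at h1
  have hna : ¬ ((a : Int) < 0) := by omega
  have hnb : ¬ ((b : Int) < 0) := by omega
  rw [if_neg hna, if_neg hnb] at h1
  simp only [Int.toNat_natCast, String.toList_ofList] at h1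
  have h2 : Nat.toDigits 10 a = Nat.toDigits 10 b := List.append_cancel_left h1
  have := pvParse_toDigits a
  rw [h2, pvParse_toDigits] at this
  omega

-- key-shape invariants on the run list
def KeyShape (runs : List (String × List String)) (i : Nat) : Prop :=
  (runs.map Prod.fst).Nodup ∧ (∀ k ∈ runs.map Prod.fst, ∃ j ≤ i, k = pvKey j) ∧
  (pvKey i ∈ runs.map Prod.fst → ∃ pre xs, runs = pre ++ [(pvKey i, xs)])

def KeyBound (runs : List (String × List String)) (i : Nat) : Prop :=
  (runs.map Prod.fst).Nodup ∧ ∀ k ∈ runs.map Prod.fst, ∃ j < i, k = pvKey j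

theorem keyShape_of_keyBound {runs : List (String × List String)} {i : Nat}
    (h : KeyBound runs i) : KeyShape runs i := by
  refine ⟨h.1, fun k hk => ?_, fun hmem => ?_⟩
  · obtain ⟨j, hj, hk'⟩ := h.2 k hk
    exact ⟨j, by omega, hk'⟩
  · obtain ⟨j, hj, hk'⟩ := h.2 _ hmem
    have := pvKey_inj hk'
    omega

theorem keyBound_succ_of_keyShape {runs : List (String × List String)} {i : Nat}
    (h : KeyShape runs i) : KeyBound runs (i + 1) := by
  refine ⟨h.1, fun k hk => ?_⟩
  obtain ⟨j, hj, hk'⟩ := h.2.1 k hk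
  exact ⟨j, by omega, hk'⟩

-- the crux: one try/except append on A's dict is one run step on B's run list
theorem pvStep_main {d : PySem.Dict String (List String)} {runs : List (String × List String)}
    {i : Nat} (e : String) (hit : d.items = runs) (h : KeyShape runs i) :
    (pvAppendTo d (pvKey i) e).items = pvRunStep runs (pvKey i, e) ∧
    KeyShape (pvRunStep runs (pvKey i, e)) i := by
  obtain ⟨hnd, hbound, hlast⟩ := h
  have hkeys : d.keys = runs.map Prod.fst := by
    simp only [PySem.Dict.keys, hit]
  by_cases hmem : pvKey i ∈ runs.map Prod.fst
  · obtain ⟨pre, xs, hrs⟩ := hlast hmem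
    have hmemit : (pvKey i, xs) ∈ d.items := by rw [hit, hrs]; simp
    have hget : d.get? (pvKey i) = some xs :=
      PySem.Dict.get?_of_mem_items d hmemit (hkeys ▸ hnd)
    have hc : d.contains (pvKey i) = true := by
      rw [PySem.Dict.contains_eq_isSome_get?, hget]; rfl
    have hknotpre : pvKey i ∉ pre.map Prod.fst := by
      rw [hrs, List.map_append] at hnd
      simp [List.nodup_append] at hnd
      intro hx
      obtain ⟨⟨a, b⟩, hab, hfst⟩ := List.mem_map.mp hx
      exact hnd.2 a b hab hfst
    have hitems' : (pvAppendTo d (pvKey i) e).items = pre ++ [(pvKey i, xs ++ [e])] := by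
      unfold pvAppendTo
      rw [hget]
      rw [PySem.Dict.items_insert_of_contains d _ hc, hit, hrs, List.map_append]
      congr 1
      · calc List.map (fun p => if (p.1 == pvKey i) = true then (pvKey i, xs ++ [e]) else p) pre
            = List.map id pre := by
              apply List.map_congr_left
              intro p hp
              have : (p.1 == pvKey i) = false := by
                rw [beq_eq_false_iff_ne]
                intro hpe
                exact hknotpre (hpe ▸ List.mem_map_of_mem hp)
              simp [this]
          _ = pre := List.map_id pre
      · simp
    have hrun : pvRunStep runs (pvKey i, e) = pre ++ [(pvKey i, xs ++ [e])] := by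
      unfold pvRunStep
      rw [hrs, List.getLast?_concat]
      simp
    refine ⟨by rw [hitems', hrun], ?_⟩
    rw [hrun]
    have hfst : (pre ++ [(pvKey i, xs ++ [e])]).map Prod.fst = runs.map Prod.fst := by
      rw [hrs]; simp
    exact ⟨hfst ▸ hnd, fun k hk => hbound k (hfst ▸ hk),
      fun _ => ⟨pre, xs ++ [e], rfl⟩⟩
  · have hc : d.contains (pvKey i) = false := by
      rw [Bool.eq_false_iff]
      intro hC
      exact hmem (hkeys ▸ (PySem.Dict.contains_iff_mem_keys d (pvKey i)).mp hC)
    have hget : d.get? (pvKey i) = none := by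
      have := PySem.Dict.contains_eq_isSome_get? d (pvKey i)
      rw [hc] at this
      exact Option.not_isSome_iff_eq_none.mp (by rw [← this]; simp)
    have hitems' : (pvAppendTo d (pvKey i) e).items = runs ++ [(pvKey i, [e])] := by
      unfold pvAppendTo
      rw [hget, PySem.Dict.items_insert_of_not_contains d _ hc, hit]
    have hrun : pvRunStep runs (pvKey i, e) = runs ++ [(pvKey i, [e])] := by
      unfold pvRunStep
      cases hr : runs.getLast? with
      | none =>
        have : runs = [] := List.getLast?_eq_none_iff.mp hr
        simp [this]
      | some last =>
        have hlmem : last ∈ runs := List.mem_of_getLast? hr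
        have : (last.1 == pvKey i) = false := by
          rw [beq_eq_false_iff_ne]
          intro hle
          exact hmem (hle ▸ List.mem_map_of_mem hlmem)
        simp [this]
    refine ⟨by rw [hitems', hrun], ?_⟩
    rw [hrun]
    refine ⟨?_, ?_, fun _ => ⟨runs, [e], rfl⟩⟩
    · rw [List.map_append, List.nodup_append]
      refine ⟨hnd, List.nodup_singleton _, fun x hx y hy => ?_⟩
      simp only [List.map_cons, List.map_nil, List.mem_singleton] at hy
      subst hy
      intro hxe
      exact hmem (hxe ▸ hx)
    · intro k hk
      rw [List.map_append] at hk
      rcases List.mem_append.mp hk with hk | hk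
      · obtain ⟨j, hj, hkj⟩ := hbound k hk
        exact ⟨j, hj, hkj⟩
      · exact ⟨i, le_refl i, by simpa using hk⟩

-- inner element loop: A's per-char step tracks B's appended assignment pairs
theorem pvEl_loop (i : Nat) (cs : List Char) :
    ∀ (n2s : PySem.Dict String String) (d : PySem.Dict String (List String))
      (ns : PySem.Set String) (asg : List (String × String)),
      n2s = pvNodeDict asg → d.items = pvRunsOf asg → ns = PySem.Set.ofList (asg.map Prod.snd) →
      KeyShape (pvRunsOf asg) i →
    cs.foldl pvA_el (n2s, d, ns, i) =
      (pvNodeDict (cs.foldl (fun l ch => l ++ [(pvKey i, String.ofList [ch])]) asg),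
       (cs.foldl pvA_el (n2s, d, ns, i)).2.1,
       PySem.Set.ofList ((cs.foldl (fun l ch => l ++ [(pvKey i, String.ofList [ch])]) asg).map Prod.snd),
       i) ∧
    (cs.foldl pvA_el (n2s, d, ns, i)).2.1.items =
      pvRunsOf (cs.foldl (fun l ch => l ++ [(pvKey i, String.ofList [ch])]) asg) ∧
    KeyShape (pvRunsOf (cs.foldl (fun l ch => l ++ [(pvKey i, String.ofList [ch])]) asg)) i := by
  induction cs with
  | nil =>
    intro n2s d ns asg hn hd hs h
    simp only [List.foldl]
    exact ⟨by rw [hn, hs], hd, h⟩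
  | cons ch cs ih =>
    intro n2s d ns asg hn hd hs h
    simp only [List.foldl]
    obtain ⟨hstep, hks⟩ := pvStep_main (d := d) (runs := pvRunsOf asg) (i := i)
      (String.ofList [ch]) hd h
    have hasg' : pvRunsOf (asg ++ [(pvKey i, String.ofList [ch])]) =
        pvRunStep (pvRunsOf asg) (pvKey i, String.ofList [ch]) := by
      unfold pvRunsOf
      rw [List.foldl_append]
      rfl
    have hn' : pvNodeDict (asg ++ [(pvKey i, String.ofList [ch])]) =
        (pvNodeDict asg).insert (String.ofList [ch]) (pvKey i) := by
      unfold pvNodeDict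
      rw [List.foldl_append]
      rfl
    have hs' : PySem.Set.ofList ((asg ++ [(pvKey i, String.ofList [ch])]).map Prod.snd) =
        PySem.Set.add (PySem.Set.ofList (asg.map Prod.snd)) (String.ofList [ch]) := by
      rw [List.map_append, PySem.Set.ofList_eq_foldl, List.foldl_append,
          ← PySem.Set.ofList_eq_foldl]
      rfl
    have := ih (n2s.insert (String.ofList [ch]) (pvKey i))
      (pvAppendTo d (pvKey i) (String.ofList [ch]))
      (PySem.Set.add ns (String.ofList [ch])) (asg ++ [(pvKey i, String.ofList [ch])])
      (by rw [hn', hn]) (by rw [hstep, hasg']) (by rw [hs', hs]) (by rw [hasg']; exact hks)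
    exact this

-- pass 1: A's cluster loop tracks B's assignment-building cluster loop
theorem pvPass1 (clusters : List (List String)) :
    ∀ (n2s : PySem.Dict String String) (d : PySem.Dict String (List String))
      (ns : PySem.Set String) (asg : List (String × String)) (i : Nat),
      n2s = pvNodeDict asg → d.items = pvRunsOf asg → ns = PySem.Set.ofList (asg.map Prod.snd) →
      KeyBound (pvRunsOf asg) i →
    clusters.foldl pvA_cluster (n2s, d, ns, i) =
      (pvNodeDict (clusters.foldl pvB_clStep (asg, i)).1,
       (clusters.foldl pvA_cluster (n2s, d, ns, i)).2.1,
       PySem.Set.ofList ((clusters.foldl pvB_clStep (asg, i)).1.map Prod.snd),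
       (clusters.foldl pvB_clStep (asg, i)).2) ∧
    (clusters.foldl pvA_cluster (n2s, d, ns, i)).2.1.items =
      pvRunsOf (clusters.foldl pvB_clStep (asg, i)).1 ∧
    KeyBound (pvRunsOf (clusters.foldl pvB_clStep (asg, i)).1)
      (clusters.foldl pvB_clStep (asg, i)).2 := by
  induction clusters with
  | nil =>
    intro n2s d ns asg i hn hd hs hb
    simp only [List.foldl]
    exact ⟨by rw [hn, hs], hd, hb⟩
  | cons c cls ih =>
    intro n2s d ns asg i hn hd hs hb
    obtain ⟨hev, hitems, hks⟩ := pvEl_loop i (((PySem.List.pyGet? c 2).getD "").toList)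
      n2s d ns asg hn hd hs (keyShape_of_keyBound hb)
    simp only [List.foldl, pvA_cluster, pvB_clStep]
    rw [hev]
    exact ih _ _ _ _ _ rfl hitems rfl (keyBound_succ_of_keyShape hks)

-- pass 2: A's node loop tracks B's singleton-assignment loop
theorem pvPass2 (ns : PySem.Set String) (nodes : List String) :
    ∀ (n2s : PySem.Dict String String) (d : PySem.Dict String (List String))
      (asg : List (String × String)) (i : Nat),
      n2s = pvNodeDict asg → d.items = pvRunsOf asg → KeyBound (pvRunsOf asg) i →
    nodes.foldl pvA_node (n2s, d, ns, i) =
      (pvNodeDict (nodes.foldl (pvB_ndStep ns) (asg, i)).1,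
       (nodes.foldl pvA_node (n2s, d, ns, i)).2.1, ns,
       (nodes.foldl (pvB_ndStep ns) (asg, i)).2) ∧
    (nodes.foldl pvA_node (n2s, d, ns, i)).2.1.items =
      pvRunsOf (nodes.foldl (pvB_ndStep ns) (asg, i)).1 ∧
    KeyBound (pvRunsOf (nodes.foldl (pvB_ndStep ns) (asg, i)).1)
      (nodes.foldl (pvB_ndStep ns) (asg, i)).2 := by
  induction nodes with
  | nil =>
    intro n2s d asg i hn hd hb
    simp only [List.foldl]
    exact ⟨by rw [hn], hd, hb⟩
  | cons node rest ih =>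
    intro n2s d asg i hn hd hb
    simp only [List.foldl, pvA_node, pvB_ndStep]
    cases hmem : PySem.Set.contains ns node with
    | true =>
      simp only [if_true]
      exact ih _ _ _ _ hn hd hb
    | false =>
      simp only [Bool.false_eq_true, if_false]
      obtain ⟨hstep, hks⟩ := pvStep_main (d := d) (runs := pvRunsOf asg) (i := i) node hd
        (keyShape_of_keyBound hb)
      have hasg' : pvRunsOf (asg ++ [(pvKey i, node)]) =
          pvRunStep (pvRunsOf asg) (pvKey i, node) := by
        unfold pvRunsOf
        rw [List.foldl_append]
        rfl
      have hn' : pvNodeDict (asg ++ [(pvKey i, node)]) =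
          (pvNodeDict asg).insert node (pvKey i) := by
        unfold pvNodeDict
        rw [List.foldl_append]
        rfl
      exact ih _ _ _ _ (by rw [hn', hn]) (by rw [hstep, hasg'])
        (by rw [hasg']; exact keyBound_succ_of_keyShape hks)

-- dict(runs) lists exactly the runs when the run names are distinct
theorem pvDictOfList_items (runs : List (String × List String))
    (hnd : (runs.map Prod.fst).Nodup) : (PySem.Dict.ofList runs).items = runs := by
  have h := PySem.Dict.items_foldl_insert_fresh (l := runs) (k := Prod.fst) (v := Prod.snd)
    (d := (PySem.Dict.empty : PySem.Dict String (List String)))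
    (by intro a _; exact PySem.Dict.contains_empty _) hnd
  simpa using h

-- ===== VERDICT (by name: the statement is the Claim_ definition above) =====
theorem find_equivalent_sets_spec : Claim_equal_find_equivalent_sets := by
  intro clusters nodes _ _
  unfold Spec_find_equivalent_sets find_equivalent_sets find_equivalent_sets_alt
  have h0 : KeyBound (pvRunsOf []) 0 := by
    constructor <;> simp [pvRunsOf]
  obtain ⟨h1, hitems1, hb1⟩ := pvPass1 clusters PySem.Dict.empty PySem.Dict.empty
    PySem.Set.empty [] 0 rfl rfl rfl h0
  dsimp only
  rw [h1]
  obtain ⟨h2, hitems2, hb2⟩ := pvPass2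
    (PySem.Set.ofList ((clusters.foldl pvB_clStep ([], 0)).1.map Prod.snd)) nodes
    _ _ _ _ rfl hitems1 hb1
  rw [Prod.mk.eta] at h2 hitems2 hb2
  rw [h2, hitems2, pvDictOfList_items _ hb2.1]
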